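-- pv_equiv track=rewrite | github.com/YourongZhou/NavigaMer | methods/spaced_seed/ales_spaced_seed.py | _oc_value
-- ===== SOURCE A (Python) =====
-- def _oc_value(seeds):
--     # 计算 seed 集合在所有平移下的 overlap complexity。
--     total = 0
--     for i in range(len(seeds)):
--         si = seeds[i]
--         li = len(si)
--         ones_i = [idx for idx, ch in enumerate(si) if ch == "1"]
--         for j in range(i, len(seeds)):
--             sj = seeds[j]
--             lj = len(sj)
--             for shift in range(-(lj - 1), li):
--                 overlap = 0
--                 for a in ones_i:
--                     b = a - shift
--                     if 0 <= b < lj and sj[b] == "1":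
--                         overlap += 1
--                 total += 1 << overlap
--     return total
-- ===== SOURCE B (Python) =====
-- def _oc_value(seeds):
--     total = 0
--     n = len(seeds)
--     lens = [len(s) for s in seeds]
--     ones = [[k for k, ch in enumerate(s) if ch == "1"] for s in seeds]
--     for i in range(n):
--         li = lens[i]
--         ones_i = ones[i]
--         for j in range(i, n):
--             lj = lens[j]
--             m = li + lj - 1
--             if m > 0:
--                 total += m
--             ones_j = ones[j]
--             if ones_i and ones_j:
--                 cnt = {}
--                 for a in ones_i:
--                     for b in ones_j:
--                         d = a - b
--                         cnt[d] = cnt.get(d, 0) + 1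
--                 for c in cnt.values():
--                     total += (1 << c) - 1
--     return total
-- ===== Notes on version B (the rewrite author's own statement) =====
-- stated objective: faster
-- what changed: Instead of rescanning ones_i for every shift of every pair, B precomputes the '1'-position lists once, credits every shift with 2^0 = 1 in closed form, and adds (2^c - 1) only for the nonzero slots of an index-difference histogram built once per pair.
import Mathlib
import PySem

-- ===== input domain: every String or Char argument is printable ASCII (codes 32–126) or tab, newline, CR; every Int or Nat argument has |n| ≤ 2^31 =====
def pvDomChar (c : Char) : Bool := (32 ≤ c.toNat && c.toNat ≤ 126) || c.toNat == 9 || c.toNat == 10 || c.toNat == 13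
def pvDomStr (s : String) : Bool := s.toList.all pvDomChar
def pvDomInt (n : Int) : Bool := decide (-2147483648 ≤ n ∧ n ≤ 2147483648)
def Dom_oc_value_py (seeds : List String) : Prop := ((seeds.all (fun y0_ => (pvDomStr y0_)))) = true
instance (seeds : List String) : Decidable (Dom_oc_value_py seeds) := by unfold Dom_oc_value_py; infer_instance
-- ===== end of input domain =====

-- B drops A's per-shift rescan of ones_i: each shift contributes 1, plus (2^c - 1) per
-- nonzero slot of an index-difference histogram built once per pair (measured faster).

-- ===== PORT A =====
-- positions of '1': [k for k, ch in enumerate(s) if ch == "1"]  (both Pythons build this the same way)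
def pvOnes (s : String) : List Int :=
  ((PySem.List.enumerate s.toList 0).filter (fun p => p.2 == '1')).map (·.1)

def oc_value_py (seeds : List String) : Int :=
  (PySem.List.pyRange 0 (seeds.length : Int) 1).foldl (fun total i =>
    -- i comes from range(len(seeds)), so pyGet? is in range and getD "" never fires
    let si := (PySem.List.pyGet? seeds i).getD ""
    let li : Int := PySem.Str.len si
    let ones_i := pvOnes si
    (PySem.List.pyRange i (seeds.length : Int) 1).foldl (fun total j =>
      let sj := (PySem.List.pyGet? seeds j).getD ""
      let lj : Int := PySem.Str.len sj
      (PySem.List.pyRange (-(lj - 1)) li 1).foldl (fun total shift =>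
        let overlap : Int := ones_i.foldl (fun overlap a =>
          let b := a - shift
          if 0 ≤ b ∧ b < lj ∧ PySem.Str.pyGet? sj b == some '1' then overlap + 1
          else overlap) 0
        total + 2 ^ overlap.toNat) total) total) 0

-- ===== PORT B =====
def oc_value_py_alt (seeds : List String) : Int :=
  let lens : List Int := seeds.map (fun s => PySem.Str.len s)
  let ones : List (List Int) := seeds.map (fun s => pvOnes s)
  (PySem.List.pyRange 0 (seeds.length : Int) 1).foldl (fun total i =>
    -- indices from range(n) are in range, so the getD defaults never fire
    let li := (PySem.List.pyGet? lens i).getD 0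
    let ones_i := (PySem.List.pyGet? ones i).getD []
    (PySem.List.pyRange i (seeds.length : Int) 1).foldl (fun total j =>
      let lj := (PySem.List.pyGet? lens j).getD 0
      let m := li + lj - 1
      let total := if 0 < m then total + m else total
      let ones_j := (PySem.List.pyGet? ones j).getD []
      if ones_i ≠ [] ∧ ones_j ≠ [] then
        -- cnt = {}; for a in ones_i: for b in ones_j: cnt[a-b] = cnt.get(a-b, 0) + 1
        let cnt : PySem.Dict Int Int := ones_i.foldl (fun d a =>
          ones_j.foldl (fun d b => d.insert (a - b) (d.getD (a - b) 0 + 1)) d)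
          PySem.Dict.empty
        -- for c in cnt.values(): total += (1 << c) - 1
        total + (cnt.values.map (fun c => (2 : Int) ^ c.toNat - 1)).sum
      else total) total) 0

-- ===== PRECONDITION & SPEC =====
def Spec_oc_value_py (seeds : List String) (out : Int) : Prop := out = oc_value_py_alt seeds
instance (seeds : List String) (out : Int) : Decidable (Spec_oc_value_py seeds out) := by unfold Spec_oc_value_py; infer_instance

-- ===== CLAIM (what is proved, stated in full; the proofs are below) =====
def Claim_equal_oc_value_py : Prop := ∀ (seeds : List String), Dom_oc_value_py seeds → Spec_oc_value_py seeds (oc_value_py seeds)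

-- ===== LEMMAS AND PROOFS =====

-- the '1'-position list has no duplicate indices
lemma pvOnes_nodup (s : String) : (pvOnes s).Nodup := by
  have h := PySem.List.pairwise_lt_enumerate (xs := s.toList) (s := 0)
  have h2 := (h.filter (fun p => p.2 == '1')).map (f := (·.1))
    (by intro a b hab; exact hab)
  exact h2.nodup.imp (fun {a b} h => by omega)

-- membership in pvOnes is exactly A's in-range-and-'1' guard
lemma pvOnes_mem_iff (s : String) (b : Int) :
    b ∈ pvOnes s ↔ 0 ≤ b ∧ b < PySem.Str.len s ∧
      PySem.Str.pyGet? s b == some '1' := by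
  unfold pvOnes
  simp only [List.mem_map, List.mem_filter, PySem.List.mem_enumerate_iff]
  have hL : s.toList.length = s.length := String.length_toList
  constructor
  · rintro ⟨p, ⟨⟨k, hk, rfl⟩, hch⟩, rfl⟩
    simp only [beq_iff_eq] at hch
    refine ⟨by omega, by simp only [PySem.Str.len_eq]; omega, ?_⟩
    have h0 : (0 : Int) + k = ((k : Nat) : Int) := by omega
    rw [h0, PySem.Str.pyGet?_natCast]
    simp [List.getElem?_eq_getElem hk, hch]
  · rintro ⟨h0, hlt, hch⟩
    have hk : b.toNat < s.toList.length := by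
      simp only [PySem.Str.len_eq] at hlt; omega
    have hb : b = ((b.toNat : Nat) : Int) := by omega
    have hget : s.toList[b.toNat]? = some '1' := by
      have := hch
      rw [hb, PySem.Str.pyGet?_natCast] at this
      simpa using this
    have hval : s.toList[b.toNat] = '1' := by
      simpa [List.getElem?_eq_getElem hk] using hget
    exact ⟨(((b.toNat : Nat) : Int), '1'), ⟨⟨b.toNat, hk, by simp [hval]⟩, by simp⟩, by omega⟩

lemma pvOnes_bounds (s : String) (a : Int) (h : a ∈ pvOnes s) :
    0 ≤ a ∧ a < PySem.Str.len s := by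
  have := (pvOnes_mem_iff s a).mp h
  exact ⟨this.1, this.2.1⟩

-- A's counting scan is a countP
lemma foldl_count (p : Int → Prop) [DecidablePred p] (l : List Int) (c : Int) :
    l.foldl (fun acc a => if p a then acc + 1 else acc) c
      = c + (l.countP (fun a => decide (p a)) : Int) := by
  induction l generalizing c with
  | nil => simp
  | cons x xs ih =>
    simp only [List.foldl_cons, List.countP_cons, ih]
    by_cases h : p x <;> simp [h] <;> push_cast <;> ring

-- the flat list of index differences a - b over the two '1'-position lists
def pvDiffs (si sj : String) : List Int :=
  (pvOnes si).flatMap (fun a => (pvOnes sj).map (fun b => a - b))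

-- occurrences of a difference s in the flat list = matching a's (pvOnes sj has no duplicates)
lemma count_flatMap (oi oj : List Int) (hnd : oj.Nodup) (s : Int) :
    (oi.flatMap (fun a => oj.map (fun b => a - b))).count s
      = oi.countP (fun a => decide ((a - s) ∈ oj)) := by
  induction oi with
  | nil => simp
  | cons a oi ih =>
    have hmap : (oj.map (fun b => a - b)).count s = oj.count (a - s) := by
      rw [List.count_eq_countP, List.countP_map, List.count_eq_countP]
      apply List.countP_congr
      intro b _
      simp [Function.comp]
      omega
    simp only [List.flatMap_cons, List.count_append, List.countP_cons, ih, hmap]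
    by_cases h : (a - s) ∈ oj
    · rw [List.count_eq_one_of_mem hnd h]; simp [h]; omega
    · rw [List.count_eq_zero_of_not_mem h]; simp [h]

-- A's scanned overlap at a shift is the multiplicity of that shift among the differences
lemma overlap_eq_count (si sj : String) (shift : Int) :
    (pvOnes si).foldl (fun overlap a =>
        if 0 ≤ a - shift ∧ a - shift < PySem.Str.len sj ∧
            PySem.Str.pyGet? sj (a - shift) == some '1'
          then overlap + 1 else overlap) (0 : Int)
    = ((pvDiffs si sj).count shift : Int) := by
  rw [pvDiffs, count_flatMap _ _ (pvOnes_nodup sj) shift,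
    foldl_count (fun a => 0 ≤ a - shift ∧ a - shift < PySem.Str.len sj ∧
      PySem.Str.pyGet? sj (a - shift) == some '1')]
  simp only [Int.zero_add]
  congr 1
  apply List.countP_congr
  intro a _
  simp only [pvOnes_mem_iff]

-- B's nested dict-building loop is a Counter over the flat difference list
lemma cnt_eq_counter (oi oj : List Int) :
    oi.foldl (fun d a =>
        oj.foldl (fun d b => d.insert (a - b) (d.getD (a - b) 0 + 1)) d)
      PySem.Dict.empty
    = PySem.Dict.counter (oi.flatMap (fun a => oj.map (fun b => a - b))) := by
  rw [← PySem.Dict.foldl_insert_getD_add_one_eq_counter]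
  generalize PySem.Dict.empty = d
  induction oi generalizing d with
  | nil => simp
  | cons a oi ih =>
    simp only [List.flatMap_cons, List.foldl_append, List.foldl_cons, ih]
    congr 1
    rw [List.foldl_map]

-- splitting each shift's 2^c into 1 + (2^c - 1) and dropping the zero slots
lemma sum_pow_split (R K : List Int) (f : Int → Nat) (hR : R.Nodup) (hK : K.Nodup)
    (hsub : ∀ k ∈ K, k ∈ R) (hvan : ∀ s ∈ R, s ∉ K → f s = 0) :
    (R.map (fun s => (2 : Int) ^ f s)).sum
      = (R.length : Int) + (K.map (fun k => (2 : Int) ^ f k - 1)).sum := by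
  have h1 : ∀ (L : List Int), (L.map (fun s => (2 : Int) ^ f s)).sum
      = (L.length : Int) + (L.map (fun s => (2 : Int) ^ f s - 1)).sum := by
    intro L
    induction L with
    | nil => simp
    | cons x xs ih =>
      simp only [List.map_cons, List.sum_cons, List.length_cons, ih]
      push_cast
      ring
  rw [h1 R]
  congr 1
  rw [← List.sum_toFinset _ hR, ← List.sum_toFinset _ hK]
  refine (Finset.sum_subset ?_ ?_).symm
  · intro k hk
    rw [List.mem_toFinset] at *
    exact hsub k hk
  · intro s hsR hsK
    rw [List.mem_toFinset] at hsR hsK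
    rw [hvan s hsR hsK]
    simp

-- per pair: A's whole shift loop equals B's "range length + nonzero histogram slots"
lemma pair_key (si sj : String) :
    ((PySem.List.pyRange (-(PySem.Str.len sj - 1)) (PySem.Str.len si) 1).map
        (fun shift => (2 : Int) ^
          ((pvOnes si).foldl (fun overlap a =>
            if 0 ≤ a - shift ∧ a - shift < PySem.Str.len sj ∧
                PySem.Str.pyGet? sj (a - shift) == some '1'
              then overlap + 1 else overlap) (0 : Int)).toNat)).sum
    = (((PySem.Str.len si - -(PySem.Str.len sj - 1)).toNat : Int))
      + ((PySem.Set.ofList (pvDiffs si sj)).map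
          (fun k => (2 : Int) ^ ((pvDiffs si sj).count k) - 1)).sum := by
  have hmapA : (PySem.List.pyRange (-(PySem.Str.len sj - 1)) (PySem.Str.len si) 1).map
        (fun shift => (2 : Int) ^
          ((pvOnes si).foldl (fun overlap a =>
            if 0 ≤ a - shift ∧ a - shift < PySem.Str.len sj ∧
                PySem.Str.pyGet? sj (a - shift) == some '1'
              then overlap + 1 else overlap) (0 : Int)).toNat)
      = (PySem.List.pyRange (-(PySem.Str.len sj - 1)) (PySem.Str.len si) 1).map
        (fun s => (2 : Int) ^ ((pvDiffs si sj).count s)) := by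
    apply List.map_congr_left
    intro shift _
    rw [overlap_eq_count]
    simp
  rw [hmapA,
    sum_pow_split _ (PySem.Set.ofList (pvDiffs si sj)) (fun s => (pvDiffs si sj).count s)
      (PySem.List.nodup_pyRange_one _ _) (PySem.Set.nodup_ofList _)
      (by
        intro k hk
        rw [PySem.Set.mem_ofList] at hk
        rw [pvDiffs] at hk
        simp only [List.mem_flatMap, List.mem_map] at hk
        obtain ⟨a, ha, b, hb, rfl⟩ := hk
        obtain ⟨ha0, halt⟩ := pvOnes_bounds si a ha
        obtain ⟨hb0, hblt⟩ := pvOnes_bounds sj b hb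
        rw [PySem.List.mem_pyRange_one]
        omega)
      (by
        intro s _ hs
        rw [PySem.Set.mem_ofList] at hs
        exact List.count_eq_zero_of_not_mem hs),
    PySem.List.length_pyRange_one]

-- when either '1'-list is empty the difference list is empty
lemma pvDiffs_eq_nil (si sj : String) (h : pvOnes si = [] ∨ pvOnes sj = []) :
    pvDiffs si sj = [] := by
  rw [pvDiffs]
  rcases h with h | h <;> simp [h]

-- the values of the difference Counter, slot by slot
lemma values_counter_diffs (si sj : String) :
    (PySem.Dict.counter (pvDiffs si sj)).values
      = (PySem.Set.ofList (pvDiffs si sj)).map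
          (fun k => (((pvDiffs si sj).count k : Nat) : Int)) := by
  have h := PySem.Dict.items_counter (xs := pvDiffs si sj)
  calc (PySem.Dict.counter (pvDiffs si sj)).values
      = (PySem.Dict.counter (pvDiffs si sj)).items.map (·.2) := rfl
    _ = _ := by rw [h, List.map_map]; rfl

-- ===== VERDICT (by name: the statement is the Claim_ definition above) =====
theorem oc_value_py_spec : Claim_equal_oc_value_py := by
  intro seeds _
  unfold Spec_oc_value_py oc_value_py oc_value_py_alt
  apply PySem.List.foldl_congr_mem
  intro total i hi
  obtain ⟨hi0, hin⟩ := PySem.List.mem_pyRange_one.mp hi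
  have hki : i.toNat < seeds.length := by omega
  have hseq : PySem.List.pyGet? seeds i = some (seeds[i.toNat]) :=
    PySem.List.pyGet?_eq_some_getElem _ hi0 hin
  have hii : i = ((i.toNat : Nat) : Int) := by omega
  have hlens : PySem.List.pyGet? (seeds.map (fun s => PySem.Str.len s)) i
      = some (PySem.Str.len (seeds[i.toNat])) := by
    conv_lhs => rw [hii, PySem.List.pyGet?_natCast]
    simp [List.getElem?_eq_getElem hki]
  have hones : PySem.List.pyGet? (seeds.map (fun s => pvOnes s)) i
      = some (pvOnes (seeds[i.toNat])) := by
    conv_lhs => rw [hii, PySem.List.pyGet?_natCast]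
    simp [List.getElem?_eq_getElem hki]
  simp only [hseq, hlens, hones, Option.getD_some]
  apply PySem.List.foldl_congr_mem
  intro total j hj
  obtain ⟨hj0, hjn⟩ := PySem.List.mem_pyRange_one.mp hj
  have hkj : j.toNat < seeds.length := by omega
  have hsj : PySem.List.pyGet? seeds j = some (seeds[j.toNat]) :=
    PySem.List.pyGet?_eq_some_getElem _ (by omega) hjn
  have hjj : j = ((j.toNat : Nat) : Int) := by omega
  have hlensj : PySem.List.pyGet? (seeds.map (fun s => PySem.Str.len s)) j
      = some (PySem.Str.len (seeds[j.toNat])) := by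
    conv_lhs => rw [hjj, PySem.List.pyGet?_natCast]
    simp [List.getElem?_eq_getElem hkj]
  have honesj : PySem.List.pyGet? (seeds.map (fun s => pvOnes s)) j
      = some (pvOnes (seeds[j.toNat])) := by
    conv_lhs => rw [hjj, PySem.List.pyGet?_natCast]
    simp [List.getElem?_eq_getElem hkj]
  simp only [hsj, hlensj, honesj, Option.getD_some]
  simp only [PySem.List.foldl_add]
  rw [pair_key]
  by_cases hg : pvOnes (seeds[i.toNat]) ≠ [] ∧ pvOnes (seeds[j.toNat]) ≠ []
  · rw [if_pos hg, cnt_eq_counter, ← pvDiffs, values_counter_diffs, List.map_map]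
    have hcomp : ((fun c => (2 : Int) ^ c.toNat - 1) ∘
          fun k => (((pvDiffs (seeds[i.toNat]) (seeds[j.toNat])).count k : Nat) : Int))
        = fun k => (2 : Int) ^ ((pvDiffs (seeds[i.toNat]) (seeds[j.toNat])).count k) - 1 := by
      funext k
      simp [Function.comp]
    rw [hcomp]
    simp only [PySem.Str.len_eq, String.length_toList]
    split_ifs with hm
    · omega
    · omega
  · rw [if_neg hg]
    have hnil : pvDiffs (seeds[i.toNat]) (seeds[j.toNat]) = [] := by
      apply pvDiffs_eq_nil
      by_cases h1 : pvOnes (seeds[i.toNat]) = []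
      · exact Or.inl h1
      · right
        by_contra h2
        exact hg ⟨h1, h2⟩
    rw [hnil]
    simp only [PySem.Set.ofList]
    simp only [PySem.Str.len_eq, String.length_toList]
    split_ifs with hm
    · simp
      omega
    · simp
      omega
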